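-- pv_equiv track=rewrite | github.com/modestyachts/imagenet-testbed-website | website.py | selector
-- ===== SOURCE A (Python) =====
-- def selector(columns, category):
--     if category == 'ImageNet Validation Set':
--         return [x for x in columns if 'val-on' in x or x == 'val']
--     if category == 'Image Corruptions':
--         return [x for x in columns if 'disk' in x or 'memory' in x or x in ['greyscale', 'stylized_imagenet', 'avg_corruptions']]
--     if category == 'Lp Adversarial Attacks':
--         return [x for x in columns if 'pgd' in x or x == 'avg_pgd']
--     if category == 'Natural Distribution Shifts':
--         return [x for x in columns if 'pm0' in x or 'pm10' in x or 'imagenetv2' in x or x in ['imagenet-a', 'imagenet-r', 'imagenet-sketch', 'objectnet-1.0-beta']]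
-- ===== SOURCE B (Python) =====
-- _CATS = {
--     'ImageNet Validation Set': (['val-on'], ['val']),
--     'Image Corruptions': (['disk', 'memory'], ['greyscale', 'stylized_imagenet', 'avg_corruptions']),
--     'Lp Adversarial Attacks': (['pgd'], ['avg_pgd']),
--     'Natural Distribution Shifts': (['pm0', 'pm10', 'imagenetv2'],
--                                     ['imagenet-a', 'imagenet-r', 'imagenet-sketch', 'objectnet-1.0-beta']),
-- }
--
-- def selector(columns, category):
--     if category not in _CATS:
--         return None
--     subs, exacts = _CATS[category]
--     # staged passes: one full pass per substring pattern, plus one for the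
--     # exact names, marking a hit mask; then one collection pass in order
--     hit = [False] * len(columns)
--     for s in subs:
--         for i, x in enumerate(columns):
--             if s in x:
--                 hit[i] = True
--     ex = set(exacts)
--     for i, x in enumerate(columns):
--         if x in ex:
--             hit[i] = True
--     return [x for i, x in enumerate(columns) if hit[i]]
-- ===== Notes on version B (the rewrite author's own statement) =====
-- stated objective: alternative
-- what changed: Instead of one per-element filter with a hardcoded compound predicate per branch, B looks the category up in a table and runs staged passes: one full scan per substring pattern plus one exact-name scan, each marking a boolean hit mask, followed by a final collection pass; None for unknown categories matches A's fall-through.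
import Mathlib
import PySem

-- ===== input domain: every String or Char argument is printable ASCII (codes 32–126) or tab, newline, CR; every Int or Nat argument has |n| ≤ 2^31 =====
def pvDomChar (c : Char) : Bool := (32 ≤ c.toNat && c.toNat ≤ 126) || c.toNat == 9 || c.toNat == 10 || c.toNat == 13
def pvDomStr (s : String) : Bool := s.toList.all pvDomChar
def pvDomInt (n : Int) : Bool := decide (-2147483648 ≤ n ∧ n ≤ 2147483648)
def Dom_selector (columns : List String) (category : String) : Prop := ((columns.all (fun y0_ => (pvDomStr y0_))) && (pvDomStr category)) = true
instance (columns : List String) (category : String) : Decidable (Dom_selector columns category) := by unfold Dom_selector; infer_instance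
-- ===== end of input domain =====

-- B replaces A's four hardcoded single-pass filter branches by a table lookup followed by
-- staged pattern passes over a boolean hit mask and a final collection pass (alternative; same cost).

-- ===== PORT A =====
def selector (columns : List String) (category : String) : Option (List String) :=
  if category == "ImageNet Validation Set" then
    some (columns.filter (fun x => PySem.Str.isIn "val-on" x || x == "val"))
  else if category == "Image Corruptions" then
    some (columns.filter (fun x =>
      PySem.Str.isIn "disk" x || PySem.Str.isIn "memory" x ||
        ["greyscale", "stylized_imagenet", "avg_corruptions"].contains x))
  else if category == "Lp Adversarial Attacks" then
    some (columns.filter (fun x => PySem.Str.isIn "pgd" x || x == "avg_pgd"))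
  else if category == "Natural Distribution Shifts" then
    some (columns.filter (fun x =>
      PySem.Str.isIn "pm0" x || PySem.Str.isIn "pm10" x || PySem.Str.isIn "imagenetv2" x ||
        ["imagenet-a", "imagenet-r", "imagenet-sketch", "objectnet-1.0-beta"].contains x))
  else none

-- ===== PORT B =====
def selCats : PySem.Dict String (List String × List String) :=
  PySem.Dict.mk
  [("ImageNet Validation Set", (["val-on"], ["val"])),
   ("Image Corruptions", (["disk", "memory"], ["greyscale", "stylized_imagenet", "avg_corruptions"])),
   ("Lp Adversarial Attacks", (["pgd"], ["avg_pgd"])),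
   ("Natural Distribution Shifts", (["pm0", "pm10", "imagenetv2"],
      ["imagenet-a", "imagenet-r", "imagenet-sketch", "objectnet-1.0-beta"]))]

-- Python's per-pattern pass 'for i, x in enumerate(columns): if s in x: hit[i] = True'
-- updates the mask pointwise, i.e. zipWith over (columns, hit).
def selector_alt (columns : List String) (category : String) : Option (List String) :=
  match PySem.Dict.get? selCats category with
  | none => none
  | some (subs, exacts) =>
    let hit0 := List.replicate columns.length false
    let hit1 := subs.foldl
      (fun h s => List.zipWith (fun x b => b || PySem.Str.isIn s x) columns h) hit0
    let ex := PySem.Set.ofList exacts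
    let hit2 := List.zipWith (fun x b => b || ex.contains x) columns hit1
    some (((columns.zip hit2).filter (fun p => p.2)).map (fun p => p.1))

-- ===== PRECONDITION & SPEC =====
def Spec_selector (columns : List String) (category : String) (out : Option (List String)) : Prop := out = selector_alt columns category
instance (columns : List String) (category : String) (out : Option (List String)) : Decidable (Spec_selector columns category out) := by unfold Spec_selector; infer_instance

-- ===== CLAIM (what is proved, stated in full; the proofs are below) =====
def Claim_equal_selector : Prop := ∀ (columns : List String) (category : String), Dom_selector columns category → Spec_selector columns category (selector columns category)

-- ===== LEMMAS AND PROOFS =====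

-- zipWith over a list and its own map collapses pointwise
theorem zipWith_map_self {α β γ : Type} (f : α → β → γ) (q : α → β) :
    ∀ (cols : List α), List.zipWith f cols (cols.map q) = cols.map (fun x => f x (q x)) := by
  intro cols
  induction cols with
  | nil => rfl
  | cons c cs ih => simp [ih]

-- the staged per-pattern passes compute the disjunction of all pattern tests
theorem foldl_mark (cols : List String) :
    ∀ (subs : List String) (q : String → Bool),
      subs.foldl (fun h s => List.zipWith (fun x b => b || PySem.Str.isIn s x) cols h) (cols.map q)
        = cols.map (fun x => q x || subs.any (fun s => PySem.Str.isIn s x)) := by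
  intro subs
  induction subs with
  | nil => intro q; simp
  | cons s ss ih =>
    intro q
    simp only [List.foldl_cons, zipWith_map_self]
    rw [ih]
    simp [Bool.or_assoc]

-- collecting the columns at true mask positions is a filter
theorem zip_collect {α : Type} (p : α → Bool) :
    ∀ (cols : List α),
      (((cols.zip (cols.map p)).filter (fun q => q.2)).map (fun q => q.1)) = cols.filter p := by
  intro cols
  induction cols with
  | nil => rfl
  | cons c cs ih =>
    by_cases h : p c = true <;> simp [h, ih]

theorem alt_eq_filter (cols subs exacts : List String) :
    (((cols.zip
        (List.zipWith (fun x b => b || (PySem.Set.ofList exacts).contains x) cols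
          (subs.foldl
            (fun h s => List.zipWith (fun x b => b || PySem.Str.isIn s x) cols h)
            (List.replicate cols.length false)))).filter (fun p => p.2)).map (fun p => p.1))
    = cols.filter (fun x => subs.any (fun s => PySem.Str.isIn s x)
        || (PySem.Set.ofList exacts).contains x) := by
  have hrep : List.replicate cols.length false = cols.map (fun _ => false) := by
    simp
  rw [hrep, foldl_mark cols subs (fun _ => false), zipWith_map_self]
  have h2 : (cols.map fun x =>
      ((fun x => (fun _ => false) x || subs.any fun s => PySem.Str.isIn s x) x
        || (PySem.Set.ofList exacts).contains x))
      = cols.map (fun x => subs.any (fun s => PySem.Str.isIn s x)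
          || (PySem.Set.ofList exacts).contains x) := by
    simp
  rw [h2, zip_collect]

-- ===== VERDICT (by name: the statement is the Claim_ definition above) =====
theorem selector_spec : Claim_equal_selector := by
  intro columns category _
  unfold Spec_selector selector selector_alt
  by_cases h1 : category = "ImageNet Validation Set"
  · subst h1
    have hg : PySem.Dict.get? selCats "ImageNet Validation Set" = some (["val-on"], ["val"]) := by decide
    rw [hg]
    simp only [alt_eq_filter]
    refine congrArg some (List.filter_congr ?_).symm
    intro x _
    by_cases hx : x = "val" <;> simp [hx, PySem.Set.ofList, PySem.Set.add]
  by_cases h2 : category = "Image Corruptions"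
  · subst h2
    have hg : PySem.Dict.get? selCats "Image Corruptions" =
        some (["disk", "memory"], ["greyscale", "stylized_imagenet", "avg_corruptions"]) := by decide
    rw [hg]
    simp only [alt_eq_filter]
    refine congrArg some (List.filter_congr ?_).symm
    intro x _
    simp [PySem.Set.ofList, PySem.Set.add, eq_comm, Bool.or_assoc]
  by_cases h3 : category = "Lp Adversarial Attacks"
  · subst h3
    have hg : PySem.Dict.get? selCats "Lp Adversarial Attacks" = some (["pgd"], ["avg_pgd"]) := by decide
    rw [hg]
    simp only [alt_eq_filter]
    refine congrArg some (List.filter_congr ?_).symm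
    intro x _
    by_cases hx : x = "avg_pgd" <;> simp [hx, PySem.Set.ofList, PySem.Set.add]
  by_cases h4 : category = "Natural Distribution Shifts"
  · subst h4
    have hg : PySem.Dict.get? selCats "Natural Distribution Shifts" =
        some (["pm0", "pm10", "imagenetv2"],
          ["imagenet-a", "imagenet-r", "imagenet-sketch", "objectnet-1.0-beta"]) := by decide
    rw [hg]
    simp only [alt_eq_filter]
    refine congrArg some (List.filter_congr ?_).symm
    intro x _
    simp [PySem.Set.ofList, PySem.Set.add, eq_comm, Bool.or_assoc]
  · have hg : PySem.Dict.get? selCats category = none := by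
      simp [selCats, Ne.symm h1, Ne.symm h2, Ne.symm h3, Ne.symm h4, PySem.Dict.get?]
    simp [hg, h1, h2, h3, h4]
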